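-- pv_equiv track=rewrite | github.com/alexliao95311/apcsp | createperformancetask/submission/personalized_project_reference.py | determine_break
-- ===== SOURCE A (Python) =====
-- def determine_break(records, min_wins):
--     sorted_records = sorted(records, key=lambda r: (-r["wins"], r["losses"]))
--
--     breaking_teams = []
--     for record in sorted_records:
--         if record["wins"] >= min_wins:
--             breaking_teams.append(record)
--
--     num_breaking = len(breaking_teams)
--
--     bracket_sizes = [2, 4, 8, 16, 32, 64]
--     bracket_names = ["Finals", "Semis", "Quarters", "Octos", "Double Octos", "Triple Octos"]
--     break_name = "Triple Octos"
--     for b in range(len(bracket_sizes)):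
--         if bracket_sizes[b] >= num_breaking:
--             if num_breaking == bracket_sizes[b]:
--                 break_name = "Full " + bracket_names[b]
--             else:
--                 break_name = "Partial " + bracket_names[b]
--             break
--
--     return sorted_records, breaking_teams, break_name
-- ===== SOURCE B (Python) =====
-- def determine_break(records, min_wins):
--     sorted_records = sorted(records, key=lambda r: (-r["wins"], r["losses"]))
--     breaking_teams = [r for r in sorted_records if r["wins"] >= min_wins]
--     n = len(breaking_teams)
--     if n > 64:
--         return sorted_records, breaking_teams, "Triple Octos"
--     # smallest i with 2**i >= max(n, 2)
--     i = max(n - 1, 1).bit_length()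
--     names = ["Finals", "Semis", "Quarters", "Octos", "Double Octos", "Triple Octos"]
--     prefix = "Full " if n == 1 << i else "Partial "
--     return sorted_records, breaking_teams, prefix + names[i - 1]
-- ===== Notes on version B (the rewrite author's own statement) =====
-- stated objective: idiomatic
-- what changed: The append-loop filter becomes a comprehension and the linear scan over the bracket-size table is replaced by a closed-form bit_length computation of the bracket index.
import Mathlib
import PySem

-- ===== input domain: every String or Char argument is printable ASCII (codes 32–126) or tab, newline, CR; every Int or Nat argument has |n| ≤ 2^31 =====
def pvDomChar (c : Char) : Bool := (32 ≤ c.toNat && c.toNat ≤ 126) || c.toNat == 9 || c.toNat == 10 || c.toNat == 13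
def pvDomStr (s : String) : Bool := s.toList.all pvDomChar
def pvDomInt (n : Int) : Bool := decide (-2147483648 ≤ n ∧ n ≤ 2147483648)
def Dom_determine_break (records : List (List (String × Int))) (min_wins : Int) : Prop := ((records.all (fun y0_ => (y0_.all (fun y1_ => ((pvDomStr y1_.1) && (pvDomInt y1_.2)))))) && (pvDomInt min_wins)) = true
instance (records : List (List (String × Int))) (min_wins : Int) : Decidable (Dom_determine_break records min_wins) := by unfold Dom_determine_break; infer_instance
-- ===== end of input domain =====

-- B replaces A's linear scan over the bracket-size table by a closed-form bit_length
-- computation of the bracket index (objective: idiomatic); sort and filter are kept,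
-- the append-loop becoming a comprehension/filter.


-- ===== PORT A =====
-- r[k] on a record dict: first matching key (Pre_ guarantees the key is present)
def getI (r : List (String × Int)) (k : String) : Int :=
  ((r.find? (fun p => p.1 == k)).map (fun p => p.2)).getD 0

-- the 'for b in range(len(bracket_sizes))' loop with its break, over the zipped table
def bracketLoop (n : Int) : List (Int × String) → String
  | [] => "Triple Octos"
  | (sz, nm) :: rest =>
      if sz ≥ n then (if n == sz then "Full " ++ nm else "Partial " ++ nm)
      else bracketLoop n rest

def determine_break (records : List (List (String × Int))) (min_wins : Int) : (List (List (String × Int))) × (List (List (String × Int))) × String :=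
  let sorted_records := PySem.List.sorted2 records (fun r => -(getI r "wins")) (fun r => getI r "losses")
  let breaking_teams := sorted_records.foldl
    (fun acc r => if getI r "wins" ≥ min_wins then acc ++ [r] else acc) []
  let num_breaking : Int := breaking_teams.length
  let break_name := bracketLoop num_breaking
    [(2, "Finals"), (4, "Semis"), (8, "Quarters"), (16, "Octos"), (32, "Double Octos"), (64, "Triple Octos")]
  (sorted_records, breaking_teams, break_name)

-- ===== PORT B =====
-- int.bit_length for non-negative n
def bitLength : Nat → Nat
  | 0 => 0
  | n + 1 => bitLength ((n + 1) / 2) + 1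

def determine_break_alt (records : List (List (String × Int))) (min_wins : Int) : (List (List (String × Int))) × (List (List (String × Int))) × String :=
  let sorted_records := PySem.List.sorted2 records (fun r => -(getI r "wins")) (fun r => getI r "losses")
  let breaking_teams := sorted_records.filter (fun r => getI r "wins" ≥ min_wins)
  let n := breaking_teams.length
  if n > 64 then (sorted_records, breaking_teams, "Triple Octos")
  else
    let i := bitLength (max (n - 1) 1)
    let names := ["Finals", "Semis", "Quarters", "Octos", "Double Octos", "Triple Octos"]
    let pre := if n == 2 ^ i then "Full " else "Partial "
    (sorted_records, breaking_teams, pre ++ names.getD (i - 1) "")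

-- ===== PRECONDITION & SPEC =====
-- Pre_ excludes records missing a "wins" or "losses" key, on which Python A raises KeyError.
def Pre_determine_break (records : List (List (String × Int))) (min_wins : Int) : Prop :=
  (records.all (fun r => r.any (fun p => p.1 == "wins") && r.any (fun p => p.1 == "losses"))) = true
instance (records : List (List (String × Int))) (min_wins : Int) : Decidable (Pre_determine_break records min_wins) := by unfold Pre_determine_break; infer_instance
def pvWitness_determine_break : (List (List (String × Int))) × Int :=
  ([[("wins", 3), ("losses", 1)], [("wins", 5), ("losses", 0)]], 4)

def Spec_determine_break (records : List (List (String × Int))) (min_wins : Int) (out : (List (List (String × Int))) × (List (List (String × Int))) × String) : Prop := out = determine_break_alt records min_wins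
instance (records : List (List (String × Int))) (min_wins : Int) (out : (List (List (String × Int))) × (List (List (String × Int))) × String) : Decidable (Spec_determine_break records min_wins out) := by unfold Spec_determine_break; infer_instance

-- ===== CLAIM (what is proved, stated in full; the proofs are below) =====
def Claim_equal_determine_break : Prop := ∀ (records : List (List (String × Int))) (min_wins : Int), Dom_determine_break records min_wins → Pre_determine_break records min_wins → Spec_determine_break records min_wins (determine_break records min_wins)

-- ===== LEMMAS AND PROOFS =====

-- B's closed-form bracket name, as a function of the count
def bname (n : Nat) : String :=
  if n > 64 then "Triple Octos"
  else
    (if n == 2 ^ (bitLength (max (n - 1) 1)) then "Full " else "Partial ") ++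
      (["Finals", "Semis", "Quarters", "Octos", "Double Octos", "Triple Octos"] : List String).getD
        (bitLength (max (n - 1) 1) - 1) ""

lemma bracket_eq (n : Nat) : bracketLoop (n : Int)
    [(2, "Finals"), (4, "Semis"), (8, "Quarters"), (16, "Octos"), (32, "Double Octos"), (64, "Triple Octos")] = bname n := by
  by_cases h : n < 65
  · interval_cases n <;> simp [bracketLoop, bname, bitLength]
  · have hgt : ∀ sz : Int, sz ≤ 64 → ¬ (sz ≥ (n : Int)) := by
      intro sz hsz; simp only [ge_iff_le, not_le]; omega
    simp only [bracketLoop, if_neg (hgt 2 (by norm_num)), if_neg (hgt 4 (by norm_num)),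
      if_neg (hgt 8 (by norm_num)), if_neg (hgt 16 (by norm_num)),
      if_neg (hgt 32 (by norm_num)), if_neg (hgt 64 (by norm_num))]
    simp only [bname, if_pos (by omega : n > 64)]

-- ===== VERDICT (by name: the statement is the Claim_ definition above) =====
theorem determine_break_spec : Claim_equal_determine_break := by
  intro records min_wins _dom _pre
  simp only [Spec_determine_break, determine_break, determine_break_alt]
  rw [PySem.List.foldl_append_ite_eq_filter]
  simp only [List.nil_append]
  rw [bracket_eq]
  unfold bname
  split_ifs <;> rfl
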